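-- pv_equiv track=rewrite | github.com/maxxx580/tripadvisor-take-home | main.py | build_synonyms_tuples
-- ===== SOURCE A (Python) =====
-- def generate_synonmys_tuples_recusively(res, path, words, index):
--     """ this function generate all possible synonmys tuple using depth first search approach.
--
--     Arguments:
--         res {list} -- a list of tuples generated so far.
--         path {tuple} -- a tuple being built in progress.
--         words {list} -- a list of synonmys group used to build synonmys tuple
--         index {integer} -- an index pointing at the location to search for synonmys
--     """
--     if index == len(words):
--         res.append(tuple(path))
--         return
--     for w in words[index]:
--         generate_synonmys_tuples_recusively(res, path + [w], words, index+1)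
--     return
--
-- def build_synonyms_tuples(word_tuples, dictionary):
--     """ This function build a list of synonmys tuples
--
--     Arguments:
--         word_tuples {tuple} -- the original word tuple.
--         dictionary {dictionary} -- dictionary with synonyms mapping.
--
--     Returns:
--         [list] -- a list of synonmys tuples.
--     """
--     res, words = [], []
--     for word_tuple in word_tuples:
--         if word_tuple in dictionary:
--             words.append(dictionary[word_tuple] + [word_tuple])
--         else:
--             words.append([word_tuple])
--     generate_synonmys_tuples_recusively(res, [], words, 0)
--     return res
-- ===== SOURCE B (Python) =====
-- def build_synonyms_tuples(word_tuples, dictionary):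
--     # Iterative cartesian product: one left fold extends every partial tuple
--     # with each member of the current word's synonym group; no recursion and
--     # no intermediate list of groups.
--     res = [()]
--     for word_tuple in word_tuples:
--         if word_tuple in dictionary:
--             group = dictionary[word_tuple] + [word_tuple]
--         else:
--             group = [word_tuple]
--         res = [t + (w,) for t in res for w in group]
--     return res
-- ===== Notes on version B (the rewrite author's own statement) =====
-- stated objective: simpler
-- what changed: Replaces the DFS helper recursion (and the separate groups list) with a single iterative left fold that extends every partial tuple with each synonym of the current word.
import Mathlib
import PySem

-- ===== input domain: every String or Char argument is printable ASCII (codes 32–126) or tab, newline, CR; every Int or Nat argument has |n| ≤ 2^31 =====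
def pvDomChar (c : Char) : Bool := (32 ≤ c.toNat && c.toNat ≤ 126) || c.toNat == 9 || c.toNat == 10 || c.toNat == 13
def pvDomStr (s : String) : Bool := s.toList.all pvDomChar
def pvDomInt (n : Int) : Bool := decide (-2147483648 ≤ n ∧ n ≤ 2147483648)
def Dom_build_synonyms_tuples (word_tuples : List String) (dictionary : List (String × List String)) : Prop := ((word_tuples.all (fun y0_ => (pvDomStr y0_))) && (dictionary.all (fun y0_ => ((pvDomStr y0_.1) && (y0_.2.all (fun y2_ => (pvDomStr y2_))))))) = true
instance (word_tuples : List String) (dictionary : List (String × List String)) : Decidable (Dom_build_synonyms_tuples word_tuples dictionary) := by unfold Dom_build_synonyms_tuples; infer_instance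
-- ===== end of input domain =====

-- B replaces A's recursive DFS (over a pre-built list of synonym groups) by a single
-- iterative left fold that extends every partial tuple with each synonym of the current
-- word: simpler, no helper recursion.

-- ===== PORT A =====
-- literal port of generate_synonmys_tuples_recusively; `res.append` / recursion become
-- a returned accumulator. The `none` branch of the lookup is unreachable for A's calls
-- (Python would raise IndexError); it only makes the recursion total.
def generate_synonmys_tuples_recusively (res : List (List String)) (path : List String)
    (words : List (List String)) (index : Nat) : List (List String) :=
  if index = words.length then res ++ [path]
  else
    match h : words[index]? with
    | none => res
    | some g =>
      g.foldl (fun r w => generate_synonmys_tuples_recusively r (path ++ [w]) words (index + 1)) res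
termination_by words.length - index
decreasing_by
  obtain ⟨h1, -⟩ := List.getElem?_eq_some_iff.mp h
  omega

def build_synonyms_tuples (word_tuples : List String) (dictionary : List (String × List String)) : List (List String) :=
  let res : List (List String) := []
  let words : List (List String) :=
    word_tuples.foldl (fun ws word_tuple =>
      match dictionary.lookup word_tuple with
      | some v => ws ++ [v ++ [word_tuple]]
      | none => ws ++ [[word_tuple]]) []
  generate_synonmys_tuples_recusively res [] words 0

-- ===== PORT B =====
def build_synonyms_tuples_alt (word_tuples : List String) (dictionary : List (String × List String)) : List (List String) :=
  word_tuples.foldl (fun res word_tuple =>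
    let group : List String :=
      match dictionary.lookup word_tuple with
      | some v => v ++ [word_tuple]
      | none => [word_tuple]
    res.flatMap (fun t => group.map (fun w => t ++ [w]))) [[]]

-- ===== PRECONDITION & SPEC =====
def Spec_build_synonyms_tuples (word_tuples : List String) (dictionary : List (String × List String)) (out : List (List String)) : Prop := out = build_synonyms_tuples_alt word_tuples dictionary
instance (word_tuples : List String) (dictionary : List (String × List String)) (out : List (List String)) : Decidable (Spec_build_synonyms_tuples word_tuples dictionary out) := by unfold Spec_build_synonyms_tuples; infer_instance

-- ===== CLAIM (what is proved, stated in full; the proofs are below) =====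
def Claim_equal_build_synonyms_tuples : Prop := ∀ (word_tuples : List String) (dictionary : List (String × List String)), Dom_build_synonyms_tuples word_tuples dictionary → Spec_build_synonyms_tuples word_tuples dictionary (build_synonyms_tuples word_tuples dictionary)

-- ===== LEMMAS AND PROOFS =====

-- mathematical description of the product, recursing on the groups
def pvProd : List (List String) → List String → List (List String)
  | [], path => [path]
  | g :: ws, path => g.flatMap (fun w => pvProd ws (path ++ [w]))

-- A's DFS appends exactly the product of the remaining groups to the accumulator
theorem fold_gen (words : List (List String)) (index : Nat) (path : List String)
    (IH : ∀ (res : List (List String)) (path : List String),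
        generate_synonmys_tuples_recusively res path words (index + 1)
          = res ++ pvProd (words.drop (index + 1)) path) :
    ∀ (g : List String) (res : List (List String)),
      g.foldl (fun r w => generate_synonmys_tuples_recusively r (path ++ [w]) words (index + 1)) res
        = res ++ g.flatMap (fun w => pvProd (words.drop (index + 1)) (path ++ [w])) := by
  intro g
  induction g with
  | nil => intro res; simp
  | cons w gs ih =>
    intro res
    simp only [List.foldl_cons, List.flatMap_cons]
    rw [IH, ih]
    simp

theorem gen_eq (words : List (List String)) (index : Nat) (hle : index ≤ words.length) :
    ∀ (res : List (List String)) (path : List String),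
      generate_synonmys_tuples_recusively res path words index = res ++ pvProd (words.drop index) path := by
  intro res path
  rcases Nat.lt_or_ge index words.length with hlt | hge
  · rw [generate_synonmys_tuples_recusively]
    simp only [Nat.ne_of_lt hlt, if_false]
    split
    · next h => exact absurd h (by simp [List.getElem?_eq_getElem hlt])
    · next g h =>
      obtain ⟨hli, hval⟩ := List.getElem?_eq_some_iff.mp h
      have hdrop : words.drop index = g :: words.drop (index + 1) := by
        rw [List.drop_eq_getElem_cons hlt, hval]
      rw [hdrop]
      simp only [pvProd]
      exact fold_gen words index path (gen_eq words (index + 1) hlt) g res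
  · have heq : index = words.length := Nat.le_antisymm hle hge
    rw [generate_synonmys_tuples_recusively]
    simp [heq, pvProd]
termination_by words.length - index
decreasing_by omega

-- B's fold computes the product of the groups of the remaining words, over any accumulator
theorem foldB_eq (dictionary : List (String × List String)) (word_tuples : List String) (acc : List (List String)) :
    word_tuples.foldl (fun res word_tuple =>
      let group : List String :=
        match dictionary.lookup word_tuple with
        | some v => v ++ [word_tuple]
        | none => [word_tuple]
      res.flatMap (fun t => group.map (fun w => t ++ [w]))) acc
    = acc.flatMap (fun t => pvProd (word_tuples.map (fun word_tuple =>
        match dictionary.lookup word_tuple with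
        | some v => v ++ [word_tuple]
        | none => [word_tuple])) t) := by
  induction word_tuples generalizing acc with
  | nil => simp [pvProd]
  | cons w ws ih =>
    simp only [List.foldl_cons, List.map_cons]
    rw [ih]
    simp [pvProd, List.flatMap_assoc, List.flatMap_map]

-- A's groups-building loop is a map
theorem wordsA_eq (dictionary : List (String × List String)) (word_tuples : List String) (acc : List (List String)) :
    word_tuples.foldl (fun ws word_tuple =>
      match dictionary.lookup word_tuple with
      | some v => ws ++ [v ++ [word_tuple]]
      | none => ws ++ [[word_tuple]]) acc
    = acc ++ word_tuples.map (fun word_tuple =>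
        match dictionary.lookup word_tuple with
        | some v => v ++ [word_tuple]
        | none => [word_tuple]) := by
  induction word_tuples generalizing acc with
  | nil => simp
  | cons w ws ih =>
    simp only [List.foldl_cons, List.map_cons]
    cases dictionary.lookup w <;> simp [ih]

-- ===== VERDICT (by name: the statement is the Claim_ definition above) =====
theorem build_synonyms_tuples_spec : Claim_equal_build_synonyms_tuples := by
  intro word_tuples dictionary _
  unfold Spec_build_synonyms_tuples build_synonyms_tuples build_synonyms_tuples_alt
  rw [wordsA_eq, foldB_eq]
  simp only [List.nil_append]
  rw [gen_eq _ 0 (Nat.zero_le _) [] []]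
  simp
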